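-- pv_equiv track=rewrite | github.com/Dreamwings/LeetCodeSol | 3071-minimum-operations-to-write-the-letter-y-on-a-grid/minimum-operations-to-write-the-letter-y-on-a-grid.py | minimumOperationsToWriteY
-- ===== SOURCE A (Python) =====
-- from typing import List
--
-- def minimumOperationsToWriteY(grid: List[List[int]]) -> int:
--     from collections import Counter
--
--     ## S1:
--     ## T: O(N^2)
--     ## S: O(1)
--
--     # Get the size of the grid
--     n = len(grid)
--
--     # Initialize counters for each part of the "Y"
--     vert_horiz_counter = Counter()
--     non_Y_counter = Counter()
--
--     # Iterate over the grid to count the occurrences in the "Y" shape and elsewhere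
--     for i, row in enumerate(grid):
--         for j, x in enumerate(row):
--             # Calculate which part of the grid is the 'Y' shape
--             is_vert_or_first_diag = i == j and i <= n // 2
--             is_second_diag = i + j == n - 1 and i <= n // 2
--             is_horiz_middle = j == n // 2 and i >= n // 2
--
--             # Count the occurrences
--             if is_vert_or_first_diag or is_second_diag or is_horiz_middle:
--                 vert_horiz_counter[x] += 1
--             else:
--                 non_Y_counter[x] += 1
--
--     # Compute the minimum operations by finding max occurrence in 'Y' and
--     # outside 'Y', excluding the same number in both places
--     min_ops = min(
--         n * n - vert_horiz_counter[i] - non_Y_counter[j]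
--         for i in range(3) for j in range(3) if i != j
--     )
--
--     return min_ops
-- ===== SOURCE B (Python) =====
-- def minimumOperationsToWriteY(grid):
--     n = len(grid)
--     h = n // 2
--     def kept(yv, ov):
--         # cells that already hold the right value for this candidate painting
--         k = 0
--         for i, row in enumerate(grid):
--             for j, x in enumerate(row):
--                 on_y = (i <= h and (j == i or i + j == n - 1)) or (i >= h and j == h)
--                 if x == (yv if on_y else ov):
--                     k += 1
--         return k
--     # try each of the six candidate paintings directly
--     return min(n * n - kept(yv, ov) for yv in range(3) for ov in range(3) if yv != ov)
-- ===== Notes on version B (the rewrite author's own statement) =====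
-- stated objective: alternative
-- what changed: B evaluates each of the six candidate paintings (Y value, background value) directly, counting in a dedicated pass how many cells already hold the right value and returning n*n minus the best such count, instead of A's single pass that builds two value-frequency Counters and then minimizes a closed-form expression over them.
import Mathlib
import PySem

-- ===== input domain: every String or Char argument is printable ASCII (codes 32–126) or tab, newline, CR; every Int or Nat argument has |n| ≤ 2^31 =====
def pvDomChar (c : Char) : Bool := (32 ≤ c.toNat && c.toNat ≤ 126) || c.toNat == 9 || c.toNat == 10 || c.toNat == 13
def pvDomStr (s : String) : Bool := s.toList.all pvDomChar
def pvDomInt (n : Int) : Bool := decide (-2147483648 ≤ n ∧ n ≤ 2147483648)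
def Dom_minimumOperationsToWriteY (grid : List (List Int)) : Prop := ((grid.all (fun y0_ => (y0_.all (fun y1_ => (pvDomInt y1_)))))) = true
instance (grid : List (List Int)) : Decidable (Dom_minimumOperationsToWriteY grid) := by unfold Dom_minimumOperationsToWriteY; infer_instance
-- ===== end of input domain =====

-- B tries each of the six candidate paintings (Y value, background value) directly,
-- counting per pair how many cells already hold the right value, instead of A's
-- single pass building two value-frequency Counters; alternative, same cost class.

-- ===== PORT A =====
-- A-side helper: the counting loop of A (two Counters, per-cell classification)
def pvAcount (grid : List (List Int)) : PySem.Dict Int Int × PySem.Dict Int Int :=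
  (PySem.List.enumerate grid 0).foldl (fun st p =>
      (PySem.List.enumerate p.2 0).foldl (fun st q =>
        if (decide (p.1 = q.1) && decide (p.1 ≤ PySem.Int.floordiv (grid.length : Int) 2))
            || (decide (p.1 + q.1 = (grid.length : Int) - 1) && decide (p.1 ≤ PySem.Int.floordiv (grid.length : Int) 2))
            || (decide (q.1 = PySem.Int.floordiv (grid.length : Int) 2) && decide (p.1 ≥ PySem.Int.floordiv (grid.length : Int) 2)) then
          (st.1.modify q.2 0 (· + 1), st.2)
        else
          (st.1, st.2.modify q.2 0 (· + 1))) st)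
    ((PySem.Dict.empty : PySem.Dict Int Int), (PySem.Dict.empty : PySem.Dict Int Int))

def minimumOperationsToWriteY (grid : List (List Int)) : Int :=
  match PySem.List.min? ((PySem.List.pyRange 0 3 1).flatMap (fun i =>
      ((PySem.List.pyRange 0 3 1).filter (fun j => !(decide (i = j)))).map (fun j =>
        (grid.length : Int) * (grid.length : Int) - (pvAcount grid).1.getD i 0 - (pvAcount grid).2.getD j 0)))
      (fun v => v) with
  | some m => m
  | none => 0

-- ===== PORT B =====
-- B-side helper: the Y-shape predicate of Source B
def pvOnY (n i j : Int) : Bool :=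
  (decide (i ≤ PySem.Int.floordiv n 2) && (decide (j = i) || decide (i + j = n - 1)))
    || (decide (i ≥ PySem.Int.floordiv n 2) && decide (j = PySem.Int.floordiv n 2))

-- B-side helper: kept(yv, ov) — cells already holding the right value for this painting
def pvKept (grid : List (List Int)) (yv ov : Int) : Int :=
  (PySem.List.enumerate grid 0).foldl (fun k p =>
      (PySem.List.enumerate p.2 0).foldl (fun k q =>
        if q.2 = (if pvOnY (grid.length : Int) p.1 q.1 then yv else ov) then k + 1 else k) k) 0

def minimumOperationsToWriteY_alt (grid : List (List Int)) : Int :=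
  match PySem.List.min? ((PySem.List.pyRange 0 3 1).flatMap (fun yv =>
      ((PySem.List.pyRange 0 3 1).filter (fun ov => !(decide (yv = ov)))).map (fun ov =>
        (grid.length : Int) * (grid.length : Int) - pvKept grid yv ov)))
      (fun v => v) with
  | some m => m
  | none => 0

-- ===== PRECONDITION & SPEC =====
def Spec_minimumOperationsToWriteY (grid : List (List Int)) (out : Int) : Prop := out = minimumOperationsToWriteY_alt grid
instance (grid : List (List Int)) (out : Int) : Decidable (Spec_minimumOperationsToWriteY grid out) := by unfold Spec_minimumOperationsToWriteY; infer_instance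

-- ===== CLAIM (what is proved, stated in full; the proofs are below) =====
def Claim_equal_minimumOperationsToWriteY : Prop := ∀ (grid : List (List Int)), Dom_minimumOperationsToWriteY grid → Spec_minimumOperationsToWriteY grid (minimumOperationsToWriteY grid)

-- ===== LEMMAS AND PROOFS =====
-- proof-side helpers
theorem pv_foldl_nested {α β σ : Type} (l : List α) (g : α → List β) (f : σ → α → β → σ) (init : σ) :
    l.foldl (fun st p => (g p).foldl (fun st q => f st p q) st) init
      = (l.flatMap (fun p => (g p).map (fun q => (p, q)))).foldl (fun st c => f st c.1 c.2) init := by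
  induction l generalizing init with
  | nil => rfl
  | cons a t ih => simp [List.foldl_append, List.foldl_map, ih]

def pvCells (grid : List (List Int)) : List ((Int × List Int) × Int × Int) :=
  (PySem.List.enumerate grid 0).flatMap (fun p => (PySem.List.enumerate p.2 0).map (fun q => (p, q)))

def pvCondA (n : Int) (c : (Int × List Int) × Int × Int) : Bool :=
  (decide (c.1.1 = c.2.1) && decide (c.1.1 ≤ PySem.Int.floordiv n 2))
    || (decide (c.1.1 + c.2.1 = n - 1) && decide (c.1.1 ≤ PySem.Int.floordiv n 2))
    || (decide (c.2.1 = PySem.Int.floordiv n 2) && decide (c.1.1 ≥ PySem.Int.floordiv n 2))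

def pvY (grid : List (List Int)) (v : Int) : Nat :=
  (((pvCells grid).filter (pvCondA (grid.length : Int))).map (fun c => c.2.2)).count v

def pvNonY (grid : List (List Int)) (v : Int) : Nat :=
  (((pvCells grid).filter (fun c => !pvCondA (grid.length : Int) c)).map (fun c => c.2.2)).count v

theorem pv_foldl_classify (l : List ((Int × List Int) × Int × Int))
    (p : ((Int × List Int) × Int × Int) → Bool) (d1 d2 : PySem.Dict Int Int) :
    l.foldl (fun st c =>
        if p c then (st.1.modify c.2.2 0 (· + 1), st.2)
        else (st.1, st.2.modify c.2.2 0 (· + 1))) (d1, d2)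
      = (((l.filter p).map (fun c => c.2.2)).foldl (fun d x => d.modify x 0 (· + 1)) d1,
         ((l.filter (fun c => !p c)).map (fun c => c.2.2)).foldl (fun d x => d.modify x 0 (· + 1)) d2) := by
  induction l generalizing d1 d2 with
  | nil => rfl
  | cons a t ih => by_cases h : p a <;> simp [h, ih]

theorem pvAcount_getD (grid : List (List Int)) (v : Int) :
    (pvAcount grid).1.getD v 0 = (pvY grid v : Int) ∧ (pvAcount grid).2.getD v 0 = (pvNonY grid v : Int) := by
  have : pvAcount grid
      = ((((pvCells grid).filter (pvCondA (grid.length : Int))).map (fun c => c.2.2)).foldl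
           (fun d x => d.modify x 0 (· + 1)) PySem.Dict.empty,
         (((pvCells grid).filter (fun c => !pvCondA (grid.length : Int) c)).map (fun c => c.2.2)).foldl
           (fun d x => d.modify x 0 (· + 1)) PySem.Dict.empty) := by
    unfold pvAcount
    rw [pv_foldl_nested]
    exact pv_foldl_classify (pvCells grid) (pvCondA (grid.length : Int)) _ _
  rw [this]
  constructor <;> simp [PySem.Dict.getD_foldl_modify_add_one, pvY, pvNonY]

theorem pvOnY_eq_condA (n : Int) (c : (Int × List Int) × Int × Int) :
    pvOnY n c.1.1 c.2.1 = pvCondA n c := by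
  unfold pvOnY pvCondA
  rw [Bool.eq_iff_iff]
  simp only [Bool.or_eq_true, Bool.and_eq_true, decide_eq_true_eq]
  tauto

theorem pv_foldl_kept (yv ov : Int) (l : List ((Int × List Int) × Int × Int))
    (p : ((Int × List Int) × Int × Int) → Bool) (k : Int) :
    l.foldl (fun k c => if c.2.2 = (if p c then yv else ov) then k + 1 else k) k
      = k + (((l.filter p).map (fun c => c.2.2)).count yv : Int)
          + (((l.filter (fun c => !p c)).map (fun c => c.2.2)).count ov : Int) := by
  induction l generalizing k with
  | nil => simp
  | cons a t ih =>
    by_cases h : p a <;> by_cases hv : a.2.2 = (if p a then yv else ov) <;>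
      simp only [List.foldl_cons, h, hv, if_true, List.filter_cons,
        Bool.not_true, Bool.not_false, List.map_cons, List.count_cons, ih] <;>
      simp_all <;> omega

theorem pvKept_eq (grid : List (List Int)) (yv ov : Int) :
    pvKept grid yv ov = (pvY grid yv : Int) + (pvNonY grid ov : Int) := by
  unfold pvKept
  rw [pv_foldl_nested]
  have hfun : (fun (k : Int) (c : (Int × List Int) × Int × Int) =>
        if c.2.2 = (if pvOnY (grid.length : Int) c.1.1 c.2.1 then yv else ov) then k + 1 else k)
      = (fun k c => if c.2.2 = (if pvCondA (grid.length : Int) c then yv else ov) then k + 1 else k) := by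
    funext k c; rw [pvOnY_eq_condA]
  rw [show ((PySem.List.enumerate grid 0).flatMap
        (fun p => (PySem.List.enumerate p.2 0).map (fun q => (p, q)))) = pvCells grid from rfl,
      hfun, pv_foldl_kept yv ov (pvCells grid) (pvCondA (grid.length : Int)) 0]
  simp [pvY, pvNonY]

theorem pv_main (grid : List (List Int)) :
    minimumOperationsToWriteY grid = minimumOperationsToWriteY_alt grid := by
  unfold minimumOperationsToWriteY minimumOperationsToWriteY_alt
  have helem : ∀ i j : Int,
      (grid.length : Int) * (grid.length : Int) - (pvAcount grid).1.getD i 0 - (pvAcount grid).2.getD j 0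
        = (grid.length : Int) * (grid.length : Int) - pvKept grid i j := by
    intro i j
    rw [(pvAcount_getD grid i).1, (pvAcount_getD grid j).2, pvKept_eq]
    ring
  rw [show (fun i : Int =>
      ((PySem.List.pyRange 0 3 1).filter (fun j => !(decide (i = j)))).map (fun j =>
        (grid.length : Int) * (grid.length : Int) - (pvAcount grid).1.getD i 0 - (pvAcount grid).2.getD j 0))
    = (fun yv : Int =>
      ((PySem.List.pyRange 0 3 1).filter (fun ov => !(decide (yv = ov)))).map (fun ov =>
        (grid.length : Int) * (grid.length : Int) - pvKept grid yv ov)) from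
      funext fun i => List.map_congr_left (fun j _ => helem i j)]

-- ===== VERDICT (by name: the statement is the Claim_ definition above) =====
theorem minimumOperationsToWriteY_spec : Claim_equal_minimumOperationsToWriteY := by
  intro grid _
  unfold Spec_minimumOperationsToWriteY
  exact pv_main grid
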